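-- pv_equiv track=rewrite | github.com/alexxx998/lab1 | client.py | byte_to_origarr
-- ===== SOURCE A (Python) =====
-- word_len = 65
--
-- def byte_to_origarr(data):
--     bitarr = ''
--     for B in data:
--         for i in range(8):
--             if(B & (1 << i)):
--                 bitarr += '1'
--             else:
--                 bitarr += '0'
--     res = []
--     for word in (bitarr[_:_ + word_len] for _ in range(0, len(bitarr), word_len)):
--         x = 0
--         for i in range(len(word)):
--             x |= int(word[i] == '1') << i
--         res.append(x)
--     return res
-- ===== SOURCE B (Python) =====
-- word_len = 65
--
-- def byte_to_origarr(data):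
--     n = 0
--     for idx, b in enumerate(data):
--         n |= (b & 255) << (8 * idx)
--     mask = (1 << word_len) - 1
--     return [(n >> start) & mask for start in range(0, 8 * len(data), word_len)]
-- ===== Notes on version B (the rewrite author's own statement) =====
-- stated objective: faster
-- what changed: Replaces the per-bit '0'/'1' string construction and the nested string-parsing loops by packing all bytes into one big integer and extracting each 65-bit word with a shift and mask.
import Mathlib
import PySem

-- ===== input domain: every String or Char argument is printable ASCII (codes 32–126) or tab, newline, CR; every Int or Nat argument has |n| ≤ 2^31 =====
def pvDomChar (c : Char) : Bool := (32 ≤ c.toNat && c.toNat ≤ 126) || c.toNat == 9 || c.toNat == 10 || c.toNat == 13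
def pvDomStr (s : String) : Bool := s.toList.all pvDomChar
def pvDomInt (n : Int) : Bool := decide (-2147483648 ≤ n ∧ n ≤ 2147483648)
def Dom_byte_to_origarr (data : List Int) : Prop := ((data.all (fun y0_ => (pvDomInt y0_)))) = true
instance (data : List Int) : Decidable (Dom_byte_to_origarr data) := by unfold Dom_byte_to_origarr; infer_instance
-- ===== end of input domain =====

-- B packs the bytes into one big integer and extracts each 65-bit word by shift-and-mask,
-- dropping A's intermediate '0'/'1' string and its nested parse loops (objective: faster, constant-factor).

-- ===== PORT A =====
-- A builds an LSB-first bit string of the low 8 bits of each element, then parses 65-char chunks.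
def byte_to_origarr (data : List Int) : List Int :=
  let bitarr : List Char := data.foldl (fun acc B =>
    (List.range 8).foldl (fun acc i =>
      if PySem.Int.band B (1 <<< i) ≠ 0 then acc ++ ['1'] else acc ++ ['0']) acc) []
  (PySem.List.pyRange 0 bitarr.length 65).foldl (fun res s =>
    let word := PySem.List.slice bitarr (some s) (some (s + 65))
    let x : Int := (List.range word.length).foldl (fun x i =>
      PySem.Int.bor x ((if word.getD i ' ' = '1' then (1 : Int) else 0) <<< i)) 0
    res ++ [x]) []

-- ===== PORT B =====
-- enumerate(data) is ported via List.zipIdx (the enumeration index is a nonnegative count);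
-- n >> start with start ≥ 0 (it comes from range(0,…)) is ported as >>> on the Nat s.toNat.
def byte_to_origarr_alt (data : List Int) : List Int :=
  let n : Int := data.zipIdx.foldl (fun n bi =>
    PySem.Int.bor n (PySem.Int.band bi.1 255 <<< (8 * bi.2))) 0
  let mask : Int := (1 <<< 65) - 1
  (PySem.List.pyRange 0 (8 * (data.length : Int)) 65).map (fun s =>
    PySem.Int.band (n >>> s.toNat) mask)

-- ===== PRECONDITION & SPEC =====
def Spec_byte_to_origarr (data : List Int) (out : List Int) : Prop := out = byte_to_origarr_alt data
instance (data : List Int) (out : List Int) : Decidable (Spec_byte_to_origarr data out) := by unfold Spec_byte_to_origarr; infer_instance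

-- ===== CLAIM (what is proved, stated in full; the proofs are below) =====
def Claim_equal_byte_to_origarr : Prop := ∀ (data : List Int), Dom_byte_to_origarr data → Spec_byte_to_origarr data (byte_to_origarr data)

-- ===== LEMMAS AND PROOFS =====

-- the 8 bit characters A appends for one element
def byteBits (B : Int) : List Char :=
  (List.range 8).map (fun i => if PySem.Int.band B (1 <<< i) ≠ 0 then '1' else '0')

-- the big integer B builds, as a Nat
def natBytes (data : List Int) : Nat :=
  data.foldr (fun b acc => (PySem.Int.band b 255).toNat ||| (acc <<< 8)) 0

-- the Nat version of A's inner word-parsing loop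
def natWordStep (ws : List Char) : Nat → Nat → Nat :=
  fun x i => x ||| ((if ws.getD i ' ' = '1' then 1 else 0) <<< i)

def natWord (ws : List Char) : Nat :=
  (List.range ws.length).foldl (natWordStep ws) 0

lemma foldl_bits (p : Nat → Prop) [DecidablePred p] (l : List Nat) (acc : List Char) :
    l.foldl (fun acc i => if p i then acc ++ ['1'] else acc ++ ['0']) acc
      = acc ++ l.map (fun i => if p i then '1' else '0') := by
  induction l generalizing acc with
  | nil => simp
  | cons h t ih => simp only [List.foldl_cons, List.map_cons, ih]; split_ifs <;> simp

lemma bitarr_eq (data : List Int) (acc : List Char) :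
    data.foldl (fun acc B =>
      (List.range 8).foldl (fun acc i =>
        if PySem.Int.band B (1 <<< i) ≠ 0 then acc ++ ['1'] else acc ++ ['0']) acc) acc
      = acc ++ data.flatMap byteBits := by
  induction data generalizing acc with
  | nil => simp
  | cons b t ih =>
      simp only [List.foldl_cons, List.flatMap_cons,
        foldl_bits (fun i => PySem.Int.band b (1 <<< i) ≠ 0), ih]
      simp [byteBits, List.append_assoc]

lemma length_byteBits (B : Int) : (byteBits B).length = 8 := by simp [byteBits]

lemma length_flatMap_byteBits (data : List Int) :
    (data.flatMap byteBits).length = 8 * data.length := by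
  induction data with
  | nil => simp
  | cons b t ih => simp [List.flatMap_cons, ih, length_byteBits]; ring

-- A's Int word loop computes the cast of the Nat word loop
lemma wordloop_cast (ws : List Char) (l : List Nat) (x : Nat) :
    l.foldl (fun x i =>
      PySem.Int.bor x ((if ws.getD i ' ' = '1' then (1 : Int) else 0) <<< i)) (x : Int)
      = ((l.foldl (natWordStep ws) x : Nat) : Int) := by
  induction l generalizing x with
  | nil => rfl
  | cons i t ih =>
      simp only [List.foldl_cons]
      have hc : (if ws.getD i ' ' = '1' then (1 : Int) else 0)
          = (((if ws.getD i ' ' = '1' then 1 else 0) : Nat) : Int) := by split <;> rfl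
      rw [hc, ← Int.natCast_shiftLeft, PySem.Int.bor_natCast, ← ih]
      rfl

lemma testBit_foldl_range (ws : List Char) (n x j : Nat) :
    ((List.range n).foldl (natWordStep ws) x).testBit j
      = (x.testBit j || (decide (j < n) && decide (ws.getD j ' ' = '1'))) := by
  induction n generalizing x with
  | zero => simp
  | succ n ih =>
      rw [List.range_succ, List.foldl_append]
      simp only [List.foldl_cons, List.foldl_nil, natWordStep, Nat.testBit_lor,
        Nat.testBit_shiftLeft, ih]
      by_cases hj : j = n
      · subst hj
        have h1 : j < j + 1 := by omega
        simp only [Nat.sub_self, ge_iff_le, le_refl, decide_true, Bool.true_and, h1,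
          Nat.lt_irrefl, decide_false, Bool.false_and, Bool.or_false]
        split <;> simp_all [List.getD_eq_getElem?_getD]
      · by_cases hlt : j < n
        · have h1 : j < n + 1 := by omega
          have h2 : ¬ n ≤ j := by omega
          simp [hlt, h1, h2]
        · have h1 : ¬ j < n + 1 := by omega
          have h2 : n ≤ j := by omega
          have h3 : j - n ≠ 0 := by omega
          simp only [hlt, h1, decide_false, Bool.false_and, Bool.or_false, h2, decide_true, Bool.true_and]
          split
          · have hb : (1 : Nat) < 2 ^ (j - n) := Nat.one_lt_two_pow h3
            simp [Nat.testBit_eq_false_of_lt hb]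
          · simp

lemma natWord_testBit (ws : List Char) (j : Nat) :
    (natWord ws).testBit j = (decide (j < ws.length) && decide (ws.getD j ' ' = '1')) := by
  simp [natWord, testBit_foldl_range]

lemma sub255_testBit (x j : Nat) (hx : x < 256) (hj : j < 8) :
    (255 - x).testBit j = !(x.testBit j) := by
  interval_cases j <;> interval_cases x <;> decide

lemma testBit_255 (j : Nat) (hj : j < 8) : (255 : Nat).testBit j = true := by
  rw [show (255 : Nat) = 2 ^ 8 - 1 from rfl, Nat.testBit_two_pow_sub_one]
  simpa using hj

lemma band255_lt (b : Int) : (PySem.Int.band b 255).toNat < 256 := by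
  by_cases hb : (0 : Int) ≤ b
  · unfold PySem.Int.band
    simp only [hb, if_true, show (0:Int) ≤ 255 by norm_num]
    have : b.toNat &&& (255 : Int).toNat ≤ 255 := by
      simpa using Nat.and_le_right (n := b.toNat) (m := 255)
    simp at this ⊢; omega
  · unfold PySem.Int.band
    simp only [hb, if_false, show (0:Int) ≤ 255 by norm_num, if_true]
    simp; omega

-- the key per-byte fact: A's bit test agrees with bit j of b & 255
lemma band_byte (b : Int) (j : Nat) (hj : j < 8) :
    (PySem.Int.band b ((1 <<< j : Nat) : Int) ≠ 0) ↔ (PySem.Int.band b 255).toNat.testBit j := by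
  rw [Nat.shiftLeft_eq, one_mul]
  by_cases hb : (0 : Int) ≤ b
  · have hp : (0:Int) ≤ ((2 ^ j : Nat) : Int) := by positivity
    have e1 : PySem.Int.band b ((2 ^ j : Nat) : Int) = ((b.toNat &&& 2 ^ j : Nat) : Int) := by
      unfold PySem.Int.band
      rw [if_pos hb, if_pos hp, Int.toNat_natCast]
    have e2 : PySem.Int.band b 255 = ((b.toNat &&& 255 : Nat) : Int) := by
      unfold PySem.Int.band
      rw [if_pos hb, if_pos (show (0:Int) ≤ 255 by norm_num)]
      rfl
    rw [e1, e2]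
    simp only [Int.toNat_natCast, Nat.testBit_and, testBit_255 j hj, Bool.and_true]
    rw [Nat.and_two_pow]
    cases h : b.toNat.testBit j <;> simp
  · have hp : (0:Int) ≤ ((2 ^ j : Nat) : Int) := by positivity
    have e1 : PySem.Int.band b ((2 ^ j : Nat) : Int)
        = ((2 ^ j - (2 ^ j &&& (-b - 1).toNat) : Nat) : Int) := by
      unfold PySem.Int.band
      rw [if_neg hb, if_pos hp, Int.toNat_natCast]
    have e2 : PySem.Int.band b 255 = ((255 - (255 &&& (-b - 1).toNat) : Nat) : Int) := by
      unfold PySem.Int.band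
      rw [if_neg hb, if_pos (show (0:Int) ≤ 255 by norm_num)]
      rfl
    set m := (-b - 1).toNat with hm
    have hx : 255 &&& m < 256 := by
      have := Nat.and_le_left (n := 255) (m := m); omega
    have hxb : (255 &&& m).testBit j = m.testBit j := by
      simp [Nat.testBit_and, testBit_255 j hj]
    rw [e1, e2]
    simp only [Int.toNat_natCast, sub255_testBit _ j hx hj, hxb]
    rw [Nat.and_comm, Nat.and_two_pow]
    cases h : m.testBit j <;> simp

lemma getD_byteBits (b : Int) (k : Nat) (hk : k < 8) :
    (byteBits b).getD k ' ' = if PySem.Int.band b ((1 <<< k : Nat) : Int) ≠ 0 then '1' else '0' := by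
  simp [byteBits, List.getD_eq_getElem?_getD, hk]

lemma natBytes_testBit (data : List Int) (k : Nat) :
    (natBytes data).testBit k
      = (decide (k < 8 * data.length) && decide ((data.flatMap byteBits).getD k ' ' = '1')) := by
  induction data generalizing k with
  | nil => simp [natBytes]
  | cons b t ih =>
      have hstep : natBytes (b :: t)
          = (PySem.Int.band b 255).toNat ||| (natBytes t <<< 8) := rfl
      rw [hstep]
      by_cases hk : k < 8
      · have h8 : ¬ (8 : Nat) ≤ k := by omega
        have hlt : k < 8 * (b :: t).length := by simp; omega
        have hgd : ((b :: t).flatMap byteBits).getD k ' '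
            = (byteBits b).getD k ' ' := by
          simp only [List.flatMap_cons, List.getD_eq_getElem?_getD]
          rw [List.getElem?_append_left (by rw [length_byteBits]; omega)]
        simp only [Nat.testBit_lor, Nat.testBit_shiftLeft, h8, decide_false,
          Bool.false_and, Bool.or_false, hlt, decide_true, Bool.true_and, hgd,
          getD_byteBits b k hk]
        have hcast : ((1 <<< k : Nat) : Int) = (1 : Int) <<< k := by simp
        have hbb := band_byte b k hk
        rw [hcast] at hbb
        by_cases hb : PySem.Int.band b ((1 : Int) <<< k) ≠ 0
        · simp [hb, hbb.mp hb]
        · have h : (PySem.Int.band b 255).toNat.testBit k = false := by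
            rcases Bool.eq_false_or_eq_true ((PySem.Int.band b 255).toNat.testBit k) with h | h
            · exact absurd (hbb.mpr (by simp [h])) hb
            · exact h
          simp [hb, h]
      · have h8 : (8 : Nat) ≤ k := by omega
        have hfb : (PySem.Int.band b 255).toNat.testBit k = false := by
          apply Nat.testBit_eq_false_of_lt
          calc (PySem.Int.band b 255).toNat < 256 := band255_lt b
            _ = 2 ^ 8 := rfl
            _ ≤ 2 ^ k := Nat.pow_le_pow_right (by omega) h8
        have hgd : ((b :: t).flatMap byteBits).getD k ' '
            = (t.flatMap byteBits).getD (k - 8) ' ' := by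
          simp only [List.flatMap_cons, List.getD_eq_getElem?_getD]
          rw [List.getElem?_append_right (by rw [length_byteBits]; omega), length_byteBits]
        have hd : decide (k < 8 * (b :: t).length) = decide (k - 8 < 8 * t.length) := by
          simp only [List.length_cons]
          by_cases h : k - 8 < 8 * t.length <;> simp [h] <;> omega
        simp only [Nat.testBit_lor, Nat.testBit_shiftLeft, h8, decide_true,
          Bool.true_and, hfb, Bool.false_or, hgd, hd, ih]

-- B's Int fold computes the cast of natBytes
lemma altN_cast (data : List Int) (k : Nat) (x : Nat) :
    (data.zipIdx k).foldl (fun n bi =>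
      PySem.Int.bor n (PySem.Int.band bi.1 255 <<< (8 * bi.2))) (x : Int)
      = ((x ||| (natBytes data <<< (8 * k)) : Nat) : Int) := by
  induction data generalizing k x with
  | nil => simp [natBytes]
  | cons b t ih =>
      have hbn : PySem.Int.band b 255 = (((PySem.Int.band b 255).toNat : Nat) : Int) := by
        rw [Int.toNat_of_nonneg]
        rw [PySem.Int.band_comm]
        exact PySem.Int.band_nonneg_of_nonneg_left b (by norm_num)
      set bN := (PySem.Int.band b 255).toNat with hbN
      simp only [List.zipIdx_cons, List.foldl_cons]
      rw [hbn, show (8 * ((k : Nat) : Int)) = (((8 * k : Nat) : Nat) : Int) by push_cast; ring,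
        Int.shiftLeft_natCast, PySem.Int.bor_natCast, ih (k + 1)]
      congr 1
      have hstep : natBytes (b :: t) = bN ||| (natBytes t <<< 8) := rfl
      rw [hstep]
      apply Nat.eq_of_testBit_eq
      intro i
      simp only [Nat.testBit_lor, Nat.testBit_shiftLeft, ge_iff_le]
      by_cases h1 : 8 * k ≤ i
      · by_cases h2 : 8 * (k + 1) ≤ i
        · have e1 : i - 8 * (k + 1) = i - 8 * k - 8 := by omega
          have h3 : (8 : Nat) ≤ i - 8 * k := by omega
          simp [h1, h2, h3, e1, Bool.or_assoc]
        · have h3 : ¬ (8 : Nat) ≤ i - 8 * k := by omega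
          simp [h1, h2, h3]
      · have h2 : ¬ 8 * (k + 1) ≤ i := by omega
        simp [h1, h2]

lemma mask_cast : (((1 : Nat) <<< 65 : Nat) : Int) - 1 = ((2 ^ 65 - 1 : Nat) : Int) := by
  decide

lemma word_eq_shift (data : List Int) (sn : Nat) :
    natWord (((data.flatMap byteBits).drop sn).take 65)
      = (natBytes data >>> sn) &&& (2 ^ 65 - 1) := by
  apply Nat.eq_of_testBit_eq
  intro j
  set F := data.flatMap byteBits with hF
  have hL : F.length = 8 * data.length := length_flatMap_byteBits data
  rw [natWord_testBit, Nat.testBit_and, Nat.testBit_shiftRight, natBytes_testBit,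
    Nat.testBit_two_pow_sub_one]
  have hlen : ((F.drop sn).take 65).length = min 65 (F.length - sn) := by simp
  by_cases hj : j < 65
  · by_cases hin : sn + j < F.length
    · have h1 : j < ((F.drop sn).take 65).length := by rw [hlen]; omega
      have hgd : ((F.drop sn).take 65).getD j ' ' = F.getD (sn + j) ' ' := by
        simp only [List.getD_eq_getElem?_getD, List.getElem?_take, hj, if_pos,
          List.getElem?_drop]
      have h2 : sn + j < 8 * data.length := by omega
      rw [hgd]
      simp [hj, h2, ← hF, List.getD_eq_getElem?_getD]
      intro _
      omega
    · have h1 : ¬ j < ((F.drop sn).take 65).length := by rw [hlen]; omega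
      have h2 : ¬ sn + j < 8 * data.length := by omega
      simp [h2]
      intro _ h'
      exact absurd h' (by omega)
  · have h1 : ¬ j < ((F.drop sn).take 65).length := by rw [hlen]; omega
    simp [hj]

-- ===== VERDICT (by name: the statement is the Claim_ definition above) =====
theorem byte_to_origarr_spec : Claim_equal_byte_to_origarr := by
  intro data _
  unfold Spec_byte_to_origarr byte_to_origarr byte_to_origarr_alt
  rw [bitarr_eq data [], List.nil_append]
  set F := data.flatMap byteBits with hF
  have hL : F.length = 8 * data.length := length_flatMap_byteBits data
  rw [PySem.List.foldl_append_singleton_eq_map, List.nil_append]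
  have hN : data.zipIdx.foldl (fun n bi =>
      PySem.Int.bor n (PySem.Int.band bi.1 255 <<< (8 * bi.2))) (0 : Int)
      = ((natBytes data : Nat) : Int) := by
    have h := altN_cast data 0 0
    simpa using h
  rw [hN]
  have hrange : ((F.length : Nat) : Int) = 8 * (data.length : Int) := by
    rw [hL]; push_cast; ring
  rw [hrange]
  apply List.map_congr_left
  intro s hs
  have hs0 : 0 ≤ s := ((PySem.List.mem_pyRange_iff_of_pos (by norm_num) s).mp hs).1
  obtain ⟨sn, rfl⟩ : ∃ sn : Nat, s = (sn : Int) := ⟨s.toNat, (Int.toNat_of_nonneg hs0).symm⟩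
  have hslice : PySem.List.slice F (some (sn : Int)) (some ((sn : Int) + 65))
      = (F.drop sn).take 65 := by
    rw [show ((sn : Int) + 65) = ((sn : Int) + ((65 : Nat) : Int)) by norm_num]
    exact PySem.List.slice_natCast_add F sn 65
  rw [hslice]
  have hw := wordloop_cast ((F.drop sn).take 65) (List.range ((F.drop sn).take 65).length) 0
  rw [Nat.cast_zero] at hw
  rw [hw, ← natWord, Int.toNat_natCast, Int.shiftRight_natCast, mask_cast,
    PySem.Int.band_natCast, word_eq_shift]
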